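-- pv_equiv track=rewrite | github.com/conniepocky/advent-of-code-2022 | day8/part2.py | isVisibleDown
-- ===== SOURCE A (Python) =====
-- def isVisibleDown(i, col):
--     col = [x for x in col if x != '']
--     col = [int(x) for x in col]
--
--     count = 0
--
--     for f in reversed(range(0, len(col))):
--         if f == i:
--             break
--         if col[f] >= col[i]:
--             count += 1
--             return count
--         count += 1
--
--     return count
-- ===== SOURCE B (Python) =====
-- def isVisibleDown(i, col):
--     vals = [int(x) for x in col if x != '']
--     if not vals:
--         return 0
--     # scan UP from i+1 keeping every blocker; the last one is the one A's
--     # top-down scan hits first, and the answer is pure arithmetic from it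
--     blockers = [f for f in range(i + 1, len(vals)) if vals[f] >= vals[i]]
--     return len(vals) - blockers[-1] if blockers else len(vals) - 1 - i
-- ===== Notes on version B (the rewrite author's own statement) =====
-- stated objective: alternative
-- what changed: A accumulates a count while scanning top-down with break/early-return; B collects all blocking indices scanning bottom-up in one comprehension and computes the viewing count arithmetically from the last one (or from i when there is none).
import Mathlib
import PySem

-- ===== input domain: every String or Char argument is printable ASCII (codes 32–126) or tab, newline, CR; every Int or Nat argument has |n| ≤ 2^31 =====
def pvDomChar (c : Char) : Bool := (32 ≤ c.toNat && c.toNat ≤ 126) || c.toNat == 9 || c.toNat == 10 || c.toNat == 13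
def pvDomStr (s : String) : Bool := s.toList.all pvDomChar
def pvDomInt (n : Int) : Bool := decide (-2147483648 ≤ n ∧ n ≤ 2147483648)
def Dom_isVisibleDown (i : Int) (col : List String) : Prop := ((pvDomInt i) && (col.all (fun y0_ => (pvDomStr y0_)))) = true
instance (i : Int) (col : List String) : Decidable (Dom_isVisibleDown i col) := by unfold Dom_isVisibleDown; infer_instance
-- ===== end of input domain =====

-- B replaces A's count-accumulating top-down loop (break/early-return) by a bottom-up
-- comprehension collecting every blocking index plus arithmetic on the last one
-- (objective: alternative decomposition; same asymptotic cost).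

-- ===== PORT A =====
-- 'for f in reversed(range(0, len(col)))' with 'break' at f == i and early return at a blocker;
-- the 0-returning match arm is Python's IndexError (outside Pre_).
def pvGoA (i : Int) (vals : List Int) : List Int → Int → Int
  | [], count => count
  | f :: fs, count =>
    if f = i then count
    else
      match PySem.List.pyGet? vals f, PySem.List.pyGet? vals i with
      | some a, some t => if a ≥ t then count + 1 else pvGoA i vals fs (count + 1)
      | _, _ => 0

def isVisibleDown (i : Int) (col : List String) : Int :=
  let col1 := col.filter (fun x => x ≠ "")
  -- int(x): ValueError (none) is outside Pre_, defaulted to 0 there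
  let vals := col1.map (fun x => (PySem.Int.ofStr? x).getD 0)
  pvGoA i vals ((PySem.List.pyRange 0 (vals.length : Int) 1).reverse) 0

-- ===== PORT B =====
def isVisibleDown_alt (i : Int) (col : List String) : Int :=
  let vals := (col.filter (fun x => x ≠ "")).map (fun x => (PySem.Int.ofStr? x).getD 0)
  if vals = [] then 0
  else
    let blockers := (PySem.List.pyRange (i + 1) (vals.length : Int) 1).filter
        (fun f => (PySem.List.pyGet? vals f).getD 0 ≥ (PySem.List.pyGet? vals i).getD 0)
    match blockers.getLast? with
    | some f => (vals.length : Int) - f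
    | none => (vals.length : Int) - 1 - i

-- ===== PRECONDITION & SPEC =====
-- Pre_ excludes exactly the inputs where Python A raises: an entry (other than '') that
-- int() rejects (ValueError), and an index i outside [-n, n) of the nonempty filtered
-- column (IndexError from col[i]).
def Pre_isVisibleDown (i : Int) (col : List String) : Prop :=
  (∀ x ∈ col.filter (fun x => x ≠ ""), (PySem.Int.ofStr? x).isSome = true) ∧
  ((col.filter (fun x => x ≠ "")).length = 0 ∨
    (-((col.filter (fun x => x ≠ "")).length : Int) ≤ i ∧
      i < ((col.filter (fun x => x ≠ "")).length : Int)))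
instance (i : Int) (col : List String) : Decidable (Pre_isVisibleDown i col) := by
  unfold Pre_isVisibleDown; infer_instance

def pvWitness_isVisibleDown : Int × List String := (0, ["3", "1", "2", ""])

def Spec_isVisibleDown (i : Int) (col : List String) (out : Int) : Prop := out = isVisibleDown_alt i col
instance (i : Int) (col : List String) (out : Int) : Decidable (Spec_isVisibleDown i col out) := by unfold Spec_isVisibleDown; infer_instance

-- ===== CLAIM (what is proved, stated in full; the proofs are below) =====
def Claim_equal_isVisibleDown : Prop := ∀ (i : Int) (col : List String), Dom_isVisibleDown i col → Pre_isVisibleDown i col → Spec_isVisibleDown i col (isVisibleDown i col)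

-- ===== LEMMAS AND PROOFS =====

-- A's loop over the descending range [a, a-1, …]: the result is determined by the FIRST
-- blocking index the top-down scan meets (head of the filtered descending range down to
-- the effective stop: i itself when 0 ≤ i, the bottom of the column when i < 0).
theorem pvGoA_char_nonneg (vals : List Int) (i : Int) (hi0 : 0 ≤ i)
    (hiN : i < (vals.length : Int)) :
    ∀ (k : Nat) (a c : Int), (a - i).toNat = k → i ≤ a → a < (vals.length : Int) →
      pvGoA i vals (PySem.List.pyRange a (-1) (-1)) c =
        c + (a - (((PySem.List.pyRange a i (-1)).filter
            (fun f => (PySem.List.pyGet? vals f).getD 0 ≥ (PySem.List.pyGet? vals i).getD 0)).head?.getD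
          (i + 1))) + 1 := by
  intro k
  induction k with
  | zero =>
    intro a c hk hia haN
    have ha : a = i := by omega
    subst ha
    rw [PySem.List.pyRange_neg_one_cons (by omega), PySem.List.pyRange_neg_one_eq_nil le_rfl]
    simp only [pvGoA, if_true, List.filter_nil, List.head?_nil, Option.getD_none]
    ring_nf
  | succ k ih =>
    intro a c hk hia haN
    have hlt : i < a := by omega
    rw [PySem.List.pyRange_neg_one_cons (show (-1 : Int) < a by omega),
        PySem.List.pyRange_neg_one_cons hlt]
    have hga : PySem.List.pyGet? vals a = some vals[a.toNat] :=
      PySem.List.pyGet?_eq_some_getElem vals (by omega) haN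
    have hgi : PySem.List.pyGet? vals i = some vals[i.toNat] :=
      PySem.List.pyGet?_eq_some_getElem vals hi0 hiN
    by_cases hb : vals[a.toNat] ≥ vals[i.toNat]
    · simp only [pvGoA, if_neg (by omega : ¬ a = i), hga, hgi]
      rw [if_pos hb]
      simp only [List.filter_cons, hga]
      rw [if_pos (by simpa using hb)]
      simp only [List.head?_cons, Option.getD_some]
      ring_nf
    · simp only [pvGoA, if_neg (by omega : ¬ a = i), hga, hgi]
      rw [if_neg hb]
      rw [ih (a - 1) (c + 1) (by omega) (by omega) (by omega)]
      simp only [List.filter_cons, hga, hgi]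
      rw [if_neg (by simpa using hb)]
      ring_nf
-- same characterisation when i is negative: the break 'f == i' can never fire, the scan
-- runs through the whole descending range [a, …, 0].
theorem pvGoA_char_neg (vals : List Int) (i t : Int) (hineg : i < 0)
    (hgi : PySem.List.pyGet? vals i = some t) :
    ∀ (k : Nat) (a c : Int), (a + 1).toNat = k → -1 ≤ a → a < (vals.length : Int) →
      pvGoA i vals (PySem.List.pyRange a (-1) (-1)) c =
        c + (a - (((PySem.List.pyRange a (-1) (-1)).filter
            (fun f => (PySem.List.pyGet? vals f).getD 0 ≥ (PySem.List.pyGet? vals i).getD 0)).head?.getD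
          0)) + 1 := by
  intro k
  induction k with
  | zero =>
    intro a c hk ha haN
    have ha' : a = -1 := by omega
    subst ha'
    rw [PySem.List.pyRange_neg_one_eq_nil le_rfl]
    simp only [pvGoA, List.filter_nil, List.head?_nil, Option.getD_none]
    ring_nf
  | succ k ih =>
    intro a c hk ha haN
    have ha0 : 0 ≤ a := by omega
    rw [PySem.List.pyRange_neg_one_cons (show (-1 : Int) < a by omega)]
    have hga : PySem.List.pyGet? vals a = some vals[a.toNat] :=
      PySem.List.pyGet?_eq_some_getElem vals ha0 haN
    by_cases hb : vals[a.toNat] ≥ t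
    · simp only [pvGoA, if_neg (by omega : ¬ a = i), hga, hgi]
      rw [if_pos hb]
      simp only [List.filter_cons, hga, hgi]
      rw [if_pos (by simpa using hb)]
      simp only [List.head?_cons, Option.getD_some]
      ring_nf
    · simp only [pvGoA, if_neg (by omega : ¬ a = i), hga, hgi]
      rw [if_neg hb]
      rw [ih (a - 1) (c + 1) (by omega) (by omega) (by omega)]
      simp only [List.filter_cons, hga, hgi]
      rw [if_neg (by simpa using hb)]
      ring_nf

-- B's blockers[-1] is the head of the filter of the REVERSED (descending) range.
theorem pvB_getLast (vals : List Int) (i : Int) :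
    ((PySem.List.pyRange (i + 1) (vals.length : Int) 1).filter
      (fun f => (PySem.List.pyGet? vals f).getD 0 ≥ (PySem.List.pyGet? vals i).getD 0)).getLast? =
    ((PySem.List.pyRange ((vals.length : Int) - 1) i (-1)).filter
      (fun f => (PySem.List.pyGet? vals f).getD 0 ≥ (PySem.List.pyGet? vals i).getD 0)).head? := by
  rw [List.getLast?_eq_head?_reverse, ← List.filter_reverse]
  rw [PySem.List.pyRange_neg_one_eq_reverse ((vals.length : Int) - 1) i]
  norm_num

-- assembling both characterisations against B's expression, for an arbitrary value list
theorem pvMain (vals : List Int) (i : Int)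
    (hrange : vals.length = 0 ∨ (-((vals.length : Int)) ≤ i ∧ i < (vals.length : Int))) :
    pvGoA i vals ((PySem.List.pyRange 0 (vals.length : Int) 1).reverse) 0 =
      (if vals = [] then 0 else
        match ((PySem.List.pyRange (i + 1) (vals.length : Int) 1).filter
            (fun f => (PySem.List.pyGet? vals f).getD 0 ≥ (PySem.List.pyGet? vals i).getD 0)).getLast? with
        | some f => (vals.length : Int) - f
        | none => (vals.length : Int) - 1 - i) := by
  by_cases hnil : vals = []
  · subst hnil
    simp [pvGoA, PySem.List.pyRange_one_eq_nil (le_refl (0 : Int))]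
  · have hn : 0 < vals.length := List.length_pos_iff.mpr hnil
    have hiR : -((vals.length : Int)) ≤ i ∧ i < (vals.length : Int) := by omega
    rw [if_neg hnil]
    rw [show ((PySem.List.pyRange 0 (vals.length : Int) 1).reverse)
          = PySem.List.pyRange ((vals.length : Int) - 1) (-1) (-1) by
        rw [PySem.List.pyRange_neg_one_eq_reverse]; norm_num]
    rw [pvB_getLast]
    by_cases hi0 : 0 ≤ i
    · -- i ≥ 0 : A breaks at f = i; both scans cover (i, n)
      rw [pvGoA_char_nonneg vals i hi0 hiR.2 ((vals.length : Int) - 1 - i).toNat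
            ((vals.length : Int) - 1) 0 rfl (by omega) (by omega)]
      cases hh : ((PySem.List.pyRange ((vals.length : Int) - 1) i (-1)).filter
          (fun f => (PySem.List.pyGet? vals f).getD 0 ≥ (PySem.List.pyGet? vals i).getD 0)).head? with
      | none => simp; ring_nf
      | some F => simp; ring_nf
    · -- i < 0 : A scans the whole column; B's extra negative indices alias the top part
      have hineg : i < 0 := by omega
      have hk : 0 < (-i).toNat ∧ (-i).toNat ≤ vals.length := by omega
      have hj : vals.length - (-i).toNat < vals.length := by omega
      have hgi' : PySem.List.pyGet? vals i = some vals[vals.length - (-i).toNat] := by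
        have h1 := PySem.List.pyGet?_neg_natCast vals (-i).toNat hk.1 hk.2
        rw [show -(((-i).toNat : Nat) : Int) = i by omega] at h1
        rw [h1]
        exact List.getElem?_eq_getElem hj
      rw [pvGoA_char_neg vals i _ hineg hgi' ((vals.length : Int)).toNat
            ((vals.length : Int) - 1) 0 (by omega) (by omega) (by omega)]
      -- split B's descending range at -1
      have hsplit : PySem.List.pyRange ((vals.length : Int) - 1) i (-1)
          = PySem.List.pyRange ((vals.length : Int) - 1) (-1) (-1)
            ++ PySem.List.pyRange (-1) i (-1) := by
        rw [PySem.List.pyRange_neg_one_eq_reverse ((vals.length : Int) - 1) i,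
            PySem.List.pyRange_neg_one_eq_reverse ((vals.length : Int) - 1) (-1),
            PySem.List.pyRange_neg_one_eq_reverse (-1) i,
            PySem.List.pyRange_one_append (i + 1) 0 ((vals.length : Int) - 1 + 1)
              (by omega) (by omega)]
        norm_num [List.reverse_append]
      rw [hsplit, List.filter_append, List.head?_append]
      -- the top part always contains a blocker: index n + i sees vals[i] itself
      have hmem : ((vals.length : Int) + i) ∈ PySem.List.pyRange ((vals.length : Int) - 1) (-1) (-1) := by
        rw [PySem.List.mem_pyRange_neg_one]; omega
      have hblk : ((PySem.List.pyGet? vals ((vals.length : Int) + i)).getD 0 ≥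
          (PySem.List.pyGet? vals i).getD 0) := by
        have h2 : PySem.List.pyGet? vals ((vals.length : Int) + i)
            = some vals[vals.length - (-i).toNat] := by
          have h3 := PySem.List.pyGet?_natCast vals (vals.length - (-i).toNat)
          rw [show (((vals.length - (-i).toNat : Nat)) : Int) = (vals.length : Int) + i by omega] at h3
          rw [h3]
          exact List.getElem?_eq_getElem hj
        rw [h2, hgi']
      cases hh : ((PySem.List.pyRange ((vals.length : Int) - 1) (-1) (-1)).filter
          (fun f => (PySem.List.pyGet? vals f).getD 0 ≥ (PySem.List.pyGet? vals i).getD 0)).head? with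
      | none =>
        exfalso
        have := List.filter_eq_nil_iff.mp (List.head?_eq_none_iff.mp hh)
              ((vals.length : Int) + i) hmem
        simp [hblk] at this
      | some F => simp; ring_nf

-- ===== VERDICT (by name: the statement is the Claim_ definition above) =====
theorem isVisibleDown_spec : Claim_equal_isVisibleDown := by
  intro i col _hdom hpre
  obtain ⟨-, hrange⟩ := hpre
  have hlen : ((col.filter (fun x => x ≠ "")).map
      (fun x => (PySem.Int.ofStr? x).getD 0)).length = (col.filter (fun x => x ≠ "")).length :=
    List.length_map ..
  exact pvMain ((col.filter (fun x => x ≠ "")).map (fun x => (PySem.Int.ofStr? x).getD 0)) i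
    (by rw [hlen]; exact_mod_cast hrange)
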